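-- pv_equiv track=rewrite | github.com/DylanBruner/VexEmulator | httpServer/utils.py | DoesRequestMatchRoute
-- ===== SOURCE A (Python) =====
-- def DoesRequestMatchRoute(string1, string2) -> bool:
--     """
--     Check if each character in string1 is equal to string2, when it finds a < or > return if everything up to that point is equal
--     """
--     SplitString1 = string1.split('/')
--     SplitString2 = string2.split('/')
--
--     matches = True
--     try:
--         for i in range(len(SplitString1)):
--             if "<" in SplitString1[i] or ">" in SplitString1[i]:
--                 break
--             elif SplitString1[i] == SplitString2[i]:
--                 pass
--             else:
--                 matches = False
--     except IndexError:
--         matches = False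
--
--     return matches
-- ===== SOURCE B (Python) =====
-- def DoesRequestMatchRoute(string1, string2) -> bool:
--     """Character-level: no splitting; one scan of string1 finds the segment boundary
--     before the first wildcard, then the raw prefixes are compared directly."""
--     cut = len(string1)          # no wildcard: compare all of string1
--     last_slash = -1
--     for i, ch in enumerate(string1):
--         if ch == '<' or ch == '>':
--             if last_slash < 0:
--                 return True     # wildcard inside the very first segment
--             cut = last_slash
--             break
--         if ch == '/':
--             last_slash = i
--     if string2[:cut] != string1[:cut]:
--         return False
--     return len(string2) == cut or string2[cut] == '/'
-- ===== Notes on version B (the rewrite author's own statement) =====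
-- stated objective: alternative
-- what changed: Replaces A's split-into-segments plus per-segment flag loop with try/except IndexError by a character-level algorithm: one scan of string1 tracking the last '/' up to the first wildcard character, then a single raw string-prefix comparison and a boundary-character check, with no splitting of either string.
import Mathlib
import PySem

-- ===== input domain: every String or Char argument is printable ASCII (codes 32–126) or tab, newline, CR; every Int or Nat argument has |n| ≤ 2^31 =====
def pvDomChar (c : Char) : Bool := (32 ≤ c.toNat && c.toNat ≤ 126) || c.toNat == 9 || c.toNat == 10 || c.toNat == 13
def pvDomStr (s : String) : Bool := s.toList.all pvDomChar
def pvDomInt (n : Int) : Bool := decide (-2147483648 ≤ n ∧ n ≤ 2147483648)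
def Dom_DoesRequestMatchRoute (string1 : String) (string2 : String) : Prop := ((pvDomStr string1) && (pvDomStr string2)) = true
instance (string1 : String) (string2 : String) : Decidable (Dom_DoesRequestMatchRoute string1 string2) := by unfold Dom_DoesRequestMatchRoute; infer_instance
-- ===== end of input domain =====

-- B replaces A's split-into-segments + per-segment flag loop (with try/except IndexError)
-- by a character-level algorithm: one scan of string1 finds the segment boundary before
-- the first wildcard, then one raw prefix comparison (objective: alternative; same O(n) cost).

-- ===== PORT A =====
-- for i in range(len(SplitString1)) with SplitString2[i] indexed inside:
-- running out of SplitString2 is the IndexError branch (matches = False, loop aborted)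
def pvLoopA : List (List Char) → List (List Char) → Bool → Bool
  | [], _, m => m
  | a :: rest, s2, m =>
    if PySem.Chars.isIn ['<'] a || PySem.Chars.isIn ['>'] a then m
    else
      match s2 with
      | [] => false                 -- IndexError: matches = False, stop
      | b :: rest2 => pvLoopA rest rest2 (if a == b then m else false)

-- s.split('/') ported on the List Char side: sep "/" is nonempty, so
-- PySem.Str.split? s "/" = some (segments) with exactly these segments
def DoesRequestMatchRoute (string1 : String) (string2 : String) : Bool :=
  pvLoopA (PySem.Chars.splitOn string1.toList ['/']) (PySem.Chars.splitOn string2.toList ['/']) true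

-- ===== PORT B =====
-- the for-loop of Source B: i = index, last = last_slash; none = the early 'return True',
-- some cut = the prefix length to compare (len(string1) if no wildcard was found)
def pvScanB (len1 : Nat) : List Char → Nat → Int → Option Nat
  | [], _, _ => some len1
  | c :: rest, i, last =>
    if c == '<' || c == '>' then
      (if last < 0 then none else some last.toNat)
    else pvScanB len1 rest (i + 1) (if c == '/' then (i : Int) else last)

def DoesRequestMatchRoute_alt (string1 : String) (string2 : String) : Bool :=
  let l1 := string1.toList
  let l2 := string2.toList
  match pvScanB l1.length l1 0 (-1) with
  | none => true
  | some cut =>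
    -- string2[:cut] / string1[:cut] with 0 ≤ cut is List.take cut;
    -- string2[cut] is PySem.List.pyGet? (only evaluated when the prefixes were equal)
    if (l2.take cut == l1.take cut) = false then false
    else (l2.length == cut || PySem.List.pyGet? l2 (cut : Int) == some '/')

-- ===== PRECONDITION & SPEC =====
def Spec_DoesRequestMatchRoute (string1 : String) (string2 : String) (out : Bool) : Prop := out = DoesRequestMatchRoute_alt string1 string2
instance (string1 : String) (string2 : String) (out : Bool) : Decidable (Spec_DoesRequestMatchRoute string1 string2 out) := by unfold Spec_DoesRequestMatchRoute; infer_instance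

-- ===== CLAIM (what is proved, stated in full; the proofs are below) =====
def Claim_equal_DoesRequestMatchRoute : Prop := ∀ (string1 : String) (string2 : String), Dom_DoesRequestMatchRoute string1 string2 → Spec_DoesRequestMatchRoute string1 string2 (DoesRequestMatchRoute string1 string2)

-- ===== LEMMAS AND PROOFS =====

def pvSegs : List Char → List (List Char)
  | [] => [[]]
  | c :: r =>
    if c = '/' then [] :: pvSegs r
    else
      match pvSegs r with
      | [] => [[c]]
      | h :: t => (c :: h) :: t

theorem pvSegs_ne_nil (l : List Char) : pvSegs l ≠ [] := by
  cases l with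
  | nil => simp [pvSegs]
  | cons c r =>
    simp only [pvSegs]
    split
    · simp
    · split <;> simp

theorem pvGo_step (n : Nat) (c : Char) (rest cur : List Char) (accs : List (List Char)) :
    PySem.Chars.splitOn.go ['/'] (n+1) (c :: rest) cur accs =
      if c = '/' then PySem.Chars.splitOn.go ['/'] n rest [] (cur.reverse :: accs)
      else PySem.Chars.splitOn.go ['/'] n rest (c :: cur) accs := by
  by_cases h : c = '/'
  · subst h
    rw [PySem.Chars.splitOn.go]
    simp only [List.isPrefixOf, Bool.and_true, beq_self_eq_true, if_true, List.length_cons,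
      List.length_nil, List.drop_succ_cons, List.drop_zero]
  · rw [PySem.Chars.splitOn.go, if_neg h]
    have hb : (['/'].isPrefixOf (c :: rest)) = false := by
      simp [List.isPrefixOf]; exact fun he => absurd he.symm h
    simp only [hb, Bool.false_eq_true, if_false]

theorem pvGo_eq (l : List Char) : ∀ (n : Nat) (cur : List Char) (accs : List (List Char)),
    l.length ≤ n →
    PySem.Chars.splitOn.go ['/'] (n+1) l cur accs =
      accs.reverse ++ (match pvSegs l with
        | [] => []
        | h :: t => (cur.reverse ++ h) :: t) := by
  induction l with
  | nil => intro n cur accs _; simp [PySem.Chars.splitOn.go, pvSegs]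
  | cons c rest ih =>
    intro n cur accs hn
    simp only [List.length_cons] at hn
    obtain ⟨m, rfl⟩ : ∃ m, n = m + 1 := ⟨n - 1, by omega⟩
    rw [pvGo_step]
    by_cases h : c = '/'
    · subst h
      rw [if_pos rfl, ih m [] _ (by omega)]
      cases hsr : pvSegs rest with
      | nil => exact absurd hsr (pvSegs_ne_nil rest)
      | cons h t => simp [pvSegs, hsr]
    · rw [if_neg h, ih m (c :: cur) _ (by omega)]
      cases hsr : pvSegs rest with
      | nil => exact absurd hsr (pvSegs_ne_nil rest)
      | cons hh t => simp [pvSegs, h, hsr]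

theorem pvSplitOn_eq_segs (l : List Char) : PySem.Chars.splitOn l ['/'] = pvSegs l := by
  show PySem.Chars.splitOn.go ['/'] (l.length + 1) l [] [] = _
  rw [pvGo_eq l l.length [] [] (le_refl _)]
  cases hsr : pvSegs l with
  | nil => exact absurd hsr (pvSegs_ne_nil l)
  | cons h t => simp

def pvWIdx : List (List Char) → Nat
  | [] => 0
  | a :: rest => if PySem.Chars.isIn ['<'] a || PySem.Chars.isIn ['>'] a then 0 else pvWIdx rest + 1

def pvHasW (ss : List (List Char)) : Bool :=
  ss.any (fun a => PySem.Chars.isIn ['<'] a || PySem.Chars.isIn ['>'] a)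

def pvCutOf : List Char → Nat → Nat
  | [], _ => 0
  | c :: r, k => if c = '/' then (if k = 1 then 0 else pvCutOf r (k - 1) + 1) else pvCutOf r k + 1

theorem pvLoopA_eq (s1 : List (List Char)) : ∀ (s2 : List (List Char)) (m : Bool),
    pvLoopA s1 s2 m = (m && (s1.take (pvWIdx s1) == s2.take (pvWIdx s1))) := by
  induction s1 with
  | nil => intro s2 m; simp [pvLoopA, pvWIdx]
  | cons a rest ih =>
    intro s2 m
    by_cases hw : (PySem.Chars.isIn ['<'] a || PySem.Chars.isIn ['>'] a) = true
    · simp [pvLoopA, pvWIdx, hw]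
    · simp only [Bool.or_eq_true, not_or, Bool.not_eq_true] at hw
      cases s2 with
      | nil => simp [pvLoopA, pvWIdx, hw.1, hw.2]
      | cons b rest2 =>
        simp only [pvLoopA, pvWIdx, hw.1, hw.2, Bool.or_self, Bool.false_eq_true, if_false]
        rw [ih]
        by_cases hab : a = b
        · subst hab; cases m <;> simp
        · simp [hab]

theorem pvWIdx_le (ss : List (List Char)) : pvWIdx ss ≤ ss.length := by
  induction ss with
  | nil => simp [pvWIdx]
  | cons a rest ih =>
    simp only [pvWIdx, List.length_cons]
    split
    · omega
    · omega

theorem pvWIdx_of_not_hasW (ss : List (List Char)) (h : pvHasW ss = false) :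
    pvWIdx ss = ss.length := by
  induction ss with
  | nil => simp [pvWIdx]
  | cons a rest ih =>
    simp only [pvHasW, List.any_cons, Bool.or_eq_false_iff] at h
    simp [pvWIdx, h.1, ih h.2]

theorem pvCutOf_full (l : List Char) : pvCutOf l (pvSegs l).length = l.length := by
  induction l with
  | nil => simp [pvCutOf]
  | cons c r ih =>
    by_cases h : c = '/'
    · subst h
      have : (pvSegs ('/' :: r)).length = (pvSegs r).length + 1 := by simp [pvSegs]
      rw [this]
      simp [pvCutOf, ih, pvSegs_ne_nil r]
    · cases hsr : pvSegs r with
      | nil => exact absurd hsr (pvSegs_ne_nil r)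
      | cons hh t =>
        have : (pvSegs (c :: r)).length = (pvSegs r).length := by simp [pvSegs, h, hsr]
        rw [this]
        simp [pvCutOf, h, ih]

theorem pvIsIn_singleton (a : Char) (l : List Char) : PySem.Chars.isIn [a] l = l.contains a := by
  rw [Bool.eq_iff_iff, PySem.Chars.isIn_iff_infix, List.contains_iff_mem]
  exact List.singleton_infix_iff a l

theorem pvWildSeg_cons (c : Char) (h : List Char) (h1 : ¬ c = '<') (h2 : ¬ c = '>') :
    (PySem.Chars.isIn ['<'] (c :: h) || PySem.Chars.isIn ['>'] (c :: h))
      = (PySem.Chars.isIn ['<'] h || PySem.Chars.isIn ['>'] h) := by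
  have e1 : ('<' == c) = false := beq_eq_false_iff_ne.mpr (fun he => h1 he.symm)
  have e2 : ('>' == c) = false := beq_eq_false_iff_ne.mpr (fun he => h2 he.symm)
  simp only [pvIsIn_singleton, List.contains_cons, e1, e2, Bool.false_or]

theorem pvScanB_spec (len1 : Nat) (l : List Char) : ∀ (i : Nat) (last : Int),
    pvScanB len1 l i last =
      (if pvHasW (pvSegs l) then
        (if pvWIdx (pvSegs l) = 0 then (if last < 0 then none else some last.toNat)
         else some (i + pvCutOf l (pvWIdx (pvSegs l))))
       else some len1) := by
  induction l with
  | nil =>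
    intro i last
    have : pvHasW [[]] = false := by simp [pvHasW, pvIsIn_singleton]
    simp [pvScanB, pvSegs, this]
  | cons c rest ih =>
    intro i last
    by_cases hw : c = '<' ∨ c = '>'
    · have hc : (c == '<' || c == '>') = true := by
        rcases hw with h | h <;> simp [h]
      have hslash : ¬ c = '/' := by rcases hw with h | h <;> subst h <;> decide
      cases hsr : pvSegs rest with
      | nil => exact absurd hsr (pvSegs_ne_nil rest)
      | cons h t =>
        have hseg : pvSegs (c :: rest) = (c :: h) :: t := by simp [pvSegs, hslash, hsr]
        have hwseg : (PySem.Chars.isIn ['<'] (c :: h) || PySem.Chars.isIn ['>'] (c :: h)) = true := by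
          simp only [pvIsIn_singleton, List.contains_cons, Bool.or_eq_true, beq_iff_eq]
          rcases hw with hcc | hcc <;> subst hcc <;> tauto
        have hHas : pvHasW (pvSegs (c :: rest)) = true := by
          rw [hseg]
          simp only [pvHasW, List.any_cons, hwseg, Bool.true_or]
        have hIdx : pvWIdx (pvSegs (c :: rest)) = 0 := by
          rw [hseg]
          simp [pvWIdx, hwseg]
        rw [hHas, hIdx]
        simp [pvScanB, hc]
    · have hc : (c == '<' || c == '>') = false := by
        simp only [Bool.or_eq_false_iff, beq_eq_false_iff_ne, ne_eq]
        exact ⟨fun h => hw (Or.inl h), fun h => hw (Or.inr h)⟩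
      by_cases hs : c = '/'
      · subst hs
        have hseg : pvSegs ('/' :: rest) = [] :: pvSegs rest := by simp [pvSegs]
        have hnilW : (PySem.Chars.isIn ['<'] ([] : List Char) || PySem.Chars.isIn ['>'] ([] : List Char)) = false := by
          simp [pvIsIn_singleton]
        have hHas : pvHasW ([] :: pvSegs rest) = pvHasW (pvSegs rest) := by
          simp only [pvHasW, List.any_cons, hnilW, Bool.false_or]
        have hIdx : pvWIdx ([] :: pvSegs rest) = pvWIdx (pvSegs rest) + 1 := by
          simp [pvWIdx, hnilW]
        rw [show pvScanB len1 ('/' :: rest) i last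
              = pvScanB len1 rest (i + 1) (i : Int) by simp [pvScanB]]
        rw [ih, hseg, hHas, hIdx]
        by_cases hH : pvHasW (pvSegs rest) = true
        · rw [if_pos hH, if_pos hH]
          by_cases h0 : pvWIdx (pvSegs rest) = 0
          · rw [if_pos h0]
            have hnn : ¬ ((i : Int) < 0) := by omega
            have hcut : pvCutOf ('/' :: rest) (0 + 1) = 0 := by simp [pvCutOf]
            simp [hnn, h0, hcut]
          · rw [if_neg (by omega : ¬ (pvWIdx (pvSegs rest) + 1 = 0)), if_neg h0]
            have hcut : pvCutOf ('/' :: rest) (pvWIdx (pvSegs rest) + 1)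
                = pvCutOf rest (pvWIdx (pvSegs rest)) + 1 := by
              simp [pvCutOf, h0]
            rw [hcut]
            simp only [Option.some.injEq]
            omega
        · simp only [Bool.not_eq_true] at hH
          rw [if_neg (by simp [hH]), if_neg (by simp [hH])]
      · cases hsr : pvSegs rest with
        | nil => exact absurd hsr (pvSegs_ne_nil rest)
        | cons h t =>
          have hseg : pvSegs (c :: rest) = (c :: h) :: t := by simp [pvSegs, hs, hsr]
          have hwc := pvWildSeg_cons c h (fun he => hw (Or.inl he)) (fun he => hw (Or.inr he))
          have hHas : pvHasW (pvSegs (c :: rest)) = pvHasW (pvSegs rest) := by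
            rw [hseg, hsr]
            simp only [pvHasW, List.any_cons, hwc]
          have hIdx : pvWIdx (pvSegs (c :: rest)) = pvWIdx (pvSegs rest) := by
            rw [hseg, hsr]
            simp only [pvWIdx, hwc]
          rw [show pvScanB len1 (c :: rest) i last
                = pvScanB len1 rest (i + 1) last by simp [pvScanB, hc, hs]]
          rw [ih, hHas, hIdx]
          by_cases hH : pvHasW (pvSegs rest) = true
          · rw [if_pos hH, if_pos hH]
            by_cases h0 : pvWIdx (pvSegs rest) = 0
            · rw [if_pos h0, if_pos h0]
            · rw [if_neg h0, if_neg h0]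
              have hcut : pvCutOf (c :: rest) (pvWIdx (pvSegs rest))
                  = pvCutOf rest (pvWIdx (pvSegs rest)) + 1 := by
                simp [pvCutOf, hs]
              rw [hcut]
              simp only [Option.some.injEq]
              omega
          · simp only [Bool.not_eq_true] at hH
            rw [if_neg (by simp [hH]), if_neg (by simp [hH])]

theorem pvTake_segs_iff (l1 : List Char) : ∀ (l2 : List Char) (k : Nat),
    1 ≤ k → k ≤ (pvSegs l1).length →
    ((pvSegs l1).take k = (pvSegs l2).take k ↔
      (l2.take (pvCutOf l1 k) = l1.take (pvCutOf l1 k) ∧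
        (l2.length = pvCutOf l1 k ∨ l2[pvCutOf l1 k]? = some '/'))) := by
  induction l1 with
  | nil =>
    intro l2 k h1 h2
    have hk : k = 1 := by simp [pvSegs] at h2; omega
    subst hk
    rw [show pvCutOf [] 1 = 0 from rfl]
    cases l2 with
    | nil => simp [pvSegs]
    | cons d r2 =>
      by_cases hd : d = '/'
      · subst hd; simp [pvSegs]
      · cases hsr : pvSegs r2 with
        | nil => exact absurd hsr (pvSegs_ne_nil r2)
        | cons h t =>
          simp [pvSegs, hd, hsr]
  | cons c r ih =>
    intro l2 k h1 h2
    obtain ⟨k', rfl⟩ : ∃ k', k = k' + 1 := ⟨k - 1, by omega⟩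
    by_cases hc : c = '/'
    · subst hc
      have hseg1 : pvSegs ('/' :: r) = [] :: pvSegs r := by simp [pvSegs]
      by_cases hk0 : k' = 0
      · subst hk0
        rw [show pvCutOf ('/' :: r) 1 = 0 by simp [pvCutOf]]
        rw [hseg1]
        cases l2 with
        | nil => simp [pvSegs]
        | cons d r2 =>
          by_cases hd : d = '/'
          · subst hd; simp [pvSegs]
          · cases hsr : pvSegs r2 with
            | nil => exact absurd hsr (pvSegs_ne_nil r2)
            | cons h t =>
              simp [pvSegs, hd, hsr]
      · have hcut : pvCutOf ('/' :: r) (k' + 1) = pvCutOf r k' + 1 := by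
          simp [pvCutOf, (by omega : ¬ (k' = 0))]
        rw [hcut, hseg1]
        have hk2 : k' ≤ (pvSegs r).length := by
          rw [hseg1] at h2; simp at h2; omega
        cases l2 with
        | nil =>
          cases hsr : pvSegs r with
          | nil => exact absurd hsr (pvSegs_ne_nil r)
          | cons h t =>
            constructor
            · intro he
              exfalso
              rw [show pvSegs [] = [[]] from rfl] at he
              obtain ⟨k'', rfl⟩ : ∃ k'', k' = k'' + 1 := ⟨k' - 1, by omega⟩
              simp [List.take_succ_cons] at he
            · intro ⟨ha, _⟩
              exfalso
              simp at ha
        | cons d r2 =>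
          by_cases hd : d = '/'
          · subst hd
            have hseg2 : pvSegs ('/' :: r2) = [] :: pvSegs r2 := by simp [pvSegs]
            rw [hseg2]
            simp only [List.take_succ_cons, List.cons.injEq, true_and, List.length_cons,
              List.getElem?_cons_succ, Nat.add_right_cancel_iff]
            exact ih r2 k' (by omega) hk2
          · cases hsr2 : pvSegs r2 with
            | nil => exact absurd hsr2 (pvSegs_ne_nil r2)
            | cons h2 t2 =>
              have hseg2 : pvSegs (d :: r2) = (d :: h2) :: t2 := by simp [pvSegs, hd, hsr2]
              rw [hseg2]
              constructor
              · intro he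
                simp [List.take_succ_cons] at he
              · intro ⟨ha, _⟩
                exfalso
                rw [List.take_succ_cons, List.take_succ_cons] at ha
                exact hd (List.cons.inj ha).1
    · cases hsr : pvSegs r with
      | nil => exact absurd hsr (pvSegs_ne_nil r)
      | cons h t =>
        have hseg1 : pvSegs (c :: r) = (c :: h) :: t := by simp [pvSegs, hc, hsr]
        have hcut : pvCutOf (c :: r) (k' + 1) = pvCutOf r (k' + 1) + 1 := by
          simp [pvCutOf, hc]
        have hk2 : k' + 1 ≤ (pvSegs r).length := by
          rw [hseg1] at h2; rw [hsr]; simp at h2 ⊢; omega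
        rw [hcut, hseg1]
        cases l2 with
        | nil =>
          constructor
          · intro he
            rw [show pvSegs [] = [[]] from rfl] at he
            simp [List.take_succ_cons] at he
          · intro ⟨ha, _⟩
            exfalso
            simp at ha
        | cons d r2 =>
          by_cases hd : d = '/'
          · subst hd
            have hseg2 : pvSegs ('/' :: r2) = [] :: pvSegs r2 := by simp [pvSegs]
            rw [hseg2]
            constructor
            · intro he
              simp [List.take_succ_cons] at he
            · intro ⟨ha, _⟩
              exfalso
              rw [List.take_succ_cons, List.take_succ_cons] at ha
              exact hc (List.cons.inj ha).1.symm
          · cases hsr2 : pvSegs r2 with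
            | nil => exact absurd hsr2 (pvSegs_ne_nil r2)
            | cons h2 t2 =>
              have hseg2 : pvSegs (d :: r2) = (d :: h2) :: t2 := by simp [pvSegs, hd, hsr2]
              rw [hseg2]
              have hihm := ih r2 (k' + 1) (by omega) hk2
              rw [hsr, hsr2] at hihm
              simp only [List.take_succ_cons, List.cons.injEq, List.length_cons,
                List.getElem?_cons_succ, Nat.add_right_cancel_iff]
              constructor
              · rintro ⟨⟨hcd, hh⟩, ht⟩
                have hpre : (h :: t).take (k' + 1) = (h2 :: t2).take (k' + 1) := by
                  rw [List.take_succ_cons, List.take_succ_cons, hh, ht]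
                have hrhs := hihm.mp hpre
                exact ⟨⟨hcd.symm, hrhs.1⟩, hrhs.2⟩
              · rintro ⟨⟨hdc, hr⟩, hb⟩
                have hrhs := hihm.mpr ⟨hr, hb⟩
                rw [List.take_succ_cons, List.take_succ_cons] at hrhs
                obtain ⟨hhh, htt⟩ := List.cons.inj hrhs
                exact ⟨⟨hdc.symm, hhh⟩, htt⟩

theorem pvMain (l1 l2 : List Char) :
    pvLoopA (pvSegs l1) (pvSegs l2) true =
      (match pvScanB l1.length l1 0 (-1) with
       | none => true
       | some cut =>
         if (l2.take cut == l1.take cut) = false then false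
         else (l2.length == cut || PySem.List.pyGet? l2 (cut : Int) == some '/')) := by
  rw [pvLoopA_eq, pvScanB_spec, Bool.true_and]
  by_cases hH : pvHasW (pvSegs l1) = true
  · rw [if_pos hH]
    by_cases h0 : pvWIdx (pvSegs l1) = 0
    · rw [if_pos h0, h0]
      simp
    · rw [if_neg h0]
      simp only [Nat.zero_add]
      have hiff := pvTake_segs_iff l1 l2 (pvWIdx (pvSegs l1)) (by omega) (pvWIdx_le _)
      cases hbe : (l2.take (pvCutOf l1 (pvWIdx (pvSegs l1))) == l1.take (pvCutOf l1 (pvWIdx (pvSegs l1)))) with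
      | false =>
        rw [if_pos rfl, beq_eq_false_iff_ne]
        intro hteq
        have := (hiff.mp hteq).1
        rw [beq_eq_false_iff_ne] at hbe
        exact hbe this
      | true =>
        rw [if_neg (by simp)]
        rw [Bool.eq_iff_iff]
        simp only [beq_iff_eq, Bool.or_eq_true, PySem.List.pyGet?_natCast]
        rw [hiff]
        rw [beq_iff_eq] at hbe
        tauto
  · rw [if_neg hH]
    have hW : pvWIdx (pvSegs l1) = (pvSegs l1).length :=
      pvWIdx_of_not_hasW _ (by simpa using hH)
    have hW1 : 1 ≤ pvWIdx (pvSegs l1) := by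
      rw [hW]
      cases hsr : pvSegs l1 with
      | nil => exact absurd hsr (pvSegs_ne_nil l1)
      | cons a b => simp
    have hiff := pvTake_segs_iff l1 l2 (pvWIdx (pvSegs l1)) hW1 (pvWIdx_le _)
    have hcut : pvCutOf l1 (pvWIdx (pvSegs l1)) = l1.length := by
      rw [hW, pvCutOf_full]
    rw [hcut] at hiff
    have hred : (match some l1.length with
        | none => true
        | some cut =>
          if (List.take cut l2 == List.take cut l1) = false then false
          else (l2.length == cut || PySem.List.pyGet? l2 (cut : Int) == some '/'))
        = if (List.take l1.length l2 == List.take l1.length l1) = false then false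
          else (l2.length == l1.length || PySem.List.pyGet? l2 (l1.length : Int) == some '/') := rfl
    rw [hred]
    cases hbe : (l2.take l1.length == l1.take l1.length) with
    | false =>
      rw [if_pos rfl, beq_eq_false_iff_ne]
      intro hteq
      have := (hiff.mp hteq).1
      rw [List.take_length, beq_eq_false_iff_ne] at hbe
      rw [List.take_length] at this
      exact hbe this
    | true =>
      rw [if_neg (by simp)]
      rw [Bool.eq_iff_iff]
      simp only [beq_iff_eq, Bool.or_eq_true, PySem.List.pyGet?_natCast]
      rw [hiff]
      rw [beq_iff_eq] at hbe
      tauto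

-- ===== VERDICT (by name: the statement is the Claim_ definition above) =====
theorem DoesRequestMatchRoute_spec : Claim_equal_DoesRequestMatchRoute := by
  intro string1 string2 _
  unfold Spec_DoesRequestMatchRoute DoesRequestMatchRoute DoesRequestMatchRoute_alt
  rw [pvSplitOn_eq_segs, pvSplitOn_eq_segs]
  exact pvMain string1.toList string2.toList
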